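-- pv_equiv track=rewrite | github.com/somekindofpast/py-bites-regular-bites | counter/list_exercise_return_first_occurrence_indices_of_duplicated_words.py | get_duplicate_indices
-- ===== SOURCE A (Python) =====
-- from collections import Counter
--
-- def get_duplicate_indices(words):
--     """Given a list of words, loop through the words and check for each
--        word if it occurs more than once.
--        If so return the index of its first occurrence.
--        For example in the following list 'is' and 'it'
--        occur more than once, and they are at indices 0 and 1 so you would
--        return [0, 1]:
--        ['is', 'it', 'true', 'or', 'is', 'it', 'not?'] => [0, 1]
--        Make sure the returning list is unique and sorted in ascending order."""
--     counter = Counter()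
--     res = set()
--     for i in range(len(words)):
--         word = words[i]
--         if word not in counter.keys():
--             counter[word] = i
--         else:
--             res.add(counter[word])
--     return sorted(res)
-- ===== SOURCE B (Python) =====
-- from collections import Counter
--
-- def get_duplicate_indices(words):
--     counts = Counter(words)
--     seen = set()
--     res = []
--     for i, word in enumerate(words):
--         if counts[word] > 1 and word not in seen:
--             seen.add(word)
--             res.append(i)
--     return res
-- ===== Notes on version B (the rewrite author's own statement) =====
-- stated objective: alternative
-- what changed: B first builds a full frequency table with Counter(words), then makes one ordered pass appending the index of each word's first occurrence when its total count exceeds 1; since the pass runs in index order the result is already ascending, eliminating A's result set and final sort.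
import Mathlib
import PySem

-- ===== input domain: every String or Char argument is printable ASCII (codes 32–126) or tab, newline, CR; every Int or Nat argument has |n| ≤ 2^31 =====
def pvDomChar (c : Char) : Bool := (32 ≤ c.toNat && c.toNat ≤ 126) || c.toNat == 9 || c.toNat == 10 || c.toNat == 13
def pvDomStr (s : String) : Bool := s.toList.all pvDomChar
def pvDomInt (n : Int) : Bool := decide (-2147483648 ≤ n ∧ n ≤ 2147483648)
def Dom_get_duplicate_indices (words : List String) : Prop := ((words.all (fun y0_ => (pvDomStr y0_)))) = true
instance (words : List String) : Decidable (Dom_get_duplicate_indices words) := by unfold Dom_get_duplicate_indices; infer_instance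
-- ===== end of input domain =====

-- B replaces A's incremental first-index dict + result set + final sort by a Counter built
-- first and one ordered pass with a seen-set, whose output is already ascending (objective: alternative).

-- ===== PORT A =====
def get_duplicate_indices (words : List String) : List Int :=
  let st := (PySem.List.pyRange 0 (words.length : Int)).foldl
    (fun (st : PySem.Dict String Int × PySem.Set Int) i =>
      -- word = words[i]; exact: i ranges over 0..len(words)-1, so pyGet? is always `some`
      let word := (PySem.List.pyGet? words i).getD ""
      if st.1.contains word = false then
        (st.1.insert word i, st.2)
      else
        -- counter[word]; exact: the key is present in this branch, so getD's default is never used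
        (st.1, st.2.add (st.1.getD word 0)))
    (PySem.Dict.empty, PySem.Set.empty)
  PySem.List.sorted st.2 (fun x => x)

-- ===== PORT B =====
def get_duplicate_indices_alt (words : List String) : List Int :=
  let counts := PySem.Dict.counter words
  let st := (PySem.List.enumerate words).foldl
    (fun (st : PySem.Set String × List Int) p =>
      if 1 < counts.getD p.2 0 ∧ st.1.contains p.2 = false then
        (st.1.add p.2, st.2 ++ [p.1])
      else st)
    (PySem.Set.empty, [])
  st.2

-- ===== PRECONDITION & SPEC =====
def Spec_get_duplicate_indices (words : List String) (out : List Int) : Prop := out = get_duplicate_indices_alt words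
instance (words : List String) (out : List Int) : Decidable (Spec_get_duplicate_indices words out) := by unfold Spec_get_duplicate_indices; infer_instance

-- ===== CLAIM (what is proved, stated in full; the proofs are below) =====
def Claim_equal_get_duplicate_indices : Prop := ∀ (words : List String), Dom_get_duplicate_indices words → Spec_get_duplicate_indices words (get_duplicate_indices words)

-- ===== LEMMAS AND PROOFS =====

-- the word at index j (its value for j < words.length; "" otherwise, never relied upon)
def pvW (words : List String) (j : Nat) : String := (words[j]?).getD ""

-- index j is the first occurrence of its word, and that word is duplicated in words
abbrev pvP (words : List String) (j : Nat) : Prop :=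
  pvW words j ∉ words.take j ∧ 2 ≤ List.count (pvW words j) words

-- the canonical answer: ascending first-occurrence indices of duplicated words
def pvC (words : List String) : List Int :=
  ((List.range words.length).filter (fun j => decide (pvP words j))).map (fun j => Int.ofNat j)

-- first index of w among the first k words, as A's counter stores it
def pvFirst? (words : List String) : Nat → String → Option Int
  | 0, _ => none
  | (k+1), w =>
    match pvFirst? words k w with
    | some j => some j
    | none => if pvW words k = w then some (k : Int) else none

-- A's loop body, named for the proofs (definitionally the lambda in the port)
def pvStepA (words : List String) (st : PySem.Dict String Int × PySem.Set Int) (i : Int) :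
    PySem.Dict String Int × PySem.Set Int :=
  let word := (PySem.List.pyGet? words i).getD ""
  if st.1.contains word = false then
    (st.1.insert word i, st.2)
  else
    (st.1, st.2.add (st.1.getD word 0))

-- B's loop body, named for the proofs (definitionally the lambda in the port)
def pvStepB (words : List String) (st : PySem.Set String × List Int) (p : Int × String) :
    PySem.Set String × List Int :=
  if 1 < (PySem.Dict.counter words).getD p.2 0 ∧ st.1.contains p.2 = false then
    (st.1.add p.2, st.2 ++ [p.1])
  else st

lemma pvA_unfold (words : List String) :
    get_duplicate_indices words =
      PySem.List.sorted
        (((PySem.List.pyRange 0 (words.length : Int)).foldl (pvStepA words)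
          (PySem.Dict.empty, PySem.Set.empty)).2) (fun x => x) := rfl

lemma pvB_unfold (words : List String) :
    get_duplicate_indices_alt words =
      ((PySem.List.enumerate words).foldl (pvStepB words) (PySem.Set.empty, [])).2 := rfl

lemma pvW_eq (words : List String) (k : Nat) (hk : k < words.length) :
    pvW words k = words[k] := by
  simp [pvW, List.getElem?_eq_getElem hk]

lemma pvTake_succ (words : List String) (k : Nat) (hk : k < words.length) :
    words.take (k + 1) = words.take k ++ [pvW words k] := by
  rw [List.take_add_one, List.getElem?_eq_getElem hk, pvW_eq words k hk]
  rfl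

lemma pvFirst?_none_iff (words : List String) (k : Nat) (w : String) (hk : k ≤ words.length) :
    pvFirst? words k w = none ↔ w ∉ words.take k := by
  induction k with
  | zero => simp [pvFirst?]
  | succ k ih =>
    have hk' : k < words.length := hk
    rw [pvTake_succ words k hk']
    unfold pvFirst?
    rcases h : pvFirst? words k w with _ | j
    · have := (ih (le_of_lt hk')).mp h
      simp only []
      split_ifs with hw
      · simp [hw]
      · simp [this, Ne.symm hw]
    · have : w ∈ words.take k := by
        by_contra hmem
        exact absurd h (by simp [(ih (le_of_lt hk')).mpr hmem])
      simp [this]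

lemma pvFirst?_spec (words : List String) (k : Nat) (w : String) (x : Int)
    (hk : k ≤ words.length) (h : pvFirst? words k w = some x) :
    ∃ jn : Nat, x = (jn : Int) ∧ jn < k ∧ pvW words jn = w ∧ w ∉ words.take jn := by
  induction k with
  | zero => simp [pvFirst?] at h
  | succ k ih =>
    unfold pvFirst? at h
    rcases hp : pvFirst? words k w with _ | j
    · rw [hp] at h
      simp only [] at h
      split_ifs at h with hw
      · have hx : (k : Int) = x := by simpa using h
        subst hx
        exact ⟨k, rfl, by omega, hw, (pvFirst?_none_iff words k w (by omega)).mp hp⟩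
    · rw [hp] at h
      simp only [] at h
      have hx : j = x := by simpa using h
      subst hx
      obtain ⟨jn, rfl, hlt, hW, hmem⟩ := ih (by omega) hp
      exact ⟨jn, rfl, by omega, hW, hmem⟩

lemma pvFirst?_of_first (words : List String) (k jn : Nat) (hk : k ≤ words.length)
    (hjn : jn < k) (hW : pvW words jn ∉ words.take jn) :
    pvFirst? words k (pvW words jn) = some (jn : Int) := by
  induction k with
  | zero => omega
  | succ k ih =>
    unfold pvFirst?
    by_cases h : jn < k
    · rw [ih (by omega) h]
    · have hjk : jn = k := by omega
      subst hjk
      rw [(pvFirst?_none_iff words jn (pvW words jn) (by omega)).mpr hW]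
      simp

lemma pvFirst?_succ_of_mem (words : List String) (k : Nat) (hk : k ≤ words.length)
    (hmem : pvW words k ∈ words.take k) (w : String) :
    pvFirst? words (k + 1) w = pvFirst? words k w := by
  rcases hp : pvFirst? words k w with _ | j
  · simp only [pvFirst?, hp]
    split_ifs with hw
    · exact absurd (hw ▸ hmem) ((pvFirst?_none_iff words k w hk).mp hp)
    · rfl
  · simp [pvFirst?, hp]

lemma pvFirst?_succ_of_not_mem (words : List String) (k : Nat) (hk : k ≤ words.length)
    (hnm : pvW words k ∉ words.take k) (w : String) :
    pvFirst? words (k + 1) w = if w = pvW words k then some (k : Int) else pvFirst? words k w := by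
  rcases hp : pvFirst? words k w with _ | j
  · simp only [pvFirst?, hp]
    rcases eq_or_ne w (pvW words k) with hw | hw
    · subst hw; simp
    · rw [if_neg (fun h => hw h.symm), if_neg hw]
  · simp only [pvFirst?, hp]
    split_ifs with hw
    · exact absurd (hw ▸ hp ▸ rfl : pvFirst? words k (pvW words k) = some j)
        (by rw [(pvFirst?_none_iff words k _ hk).mpr hnm]; simp)
    · rfl

lemma pvA_inv (words : List String) (k : Nat) (hk : k ≤ words.length) :
    (∀ w, ((PySem.List.pyRange 0 (k : Int)).foldl (pvStepA words)
        (PySem.Dict.empty, PySem.Set.empty)).1.get? w = pvFirst? words k w)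
    ∧ (∀ x : Int, x ∈ ((PySem.List.pyRange 0 (k : Int)).foldl (pvStepA words)
        (PySem.Dict.empty, PySem.Set.empty)).2 ↔
        ∃ jn : Nat, x = (jn : Int) ∧ pvFirst? words k (pvW words jn) = some (jn : Int)
          ∧ 2 ≤ List.count (pvW words jn) (words.take k))
    ∧ (((PySem.List.pyRange 0 (k : Int)).foldl (pvStepA words)
        (PySem.Dict.empty, PySem.Set.empty)).2).Nodup := by
  induction k with
  | zero =>
    refine ⟨fun w => ?_, fun x => ?_, ?_⟩ <;>
      simp [PySem.List.pyRange, pvFirst?, PySem.Set.empty]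
  | succ k ih =>
    obtain ⟨ihA, ihB, ihC⟩ := ih (by omega)
    have hklt : k < words.length := hk
    have hrange : PySem.List.pyRange 0 ((k + 1 : Nat) : Int)
        = PySem.List.pyRange 0 (k : Int) ++ [(k : Int)] := by
      push_cast
      exact PySem.List.pyRange_one_succ_right (by positivity)
    rw [hrange, List.foldl_append]
    simp only [List.foldl_cons, List.foldl_nil]
    set st := (PySem.List.pyRange 0 (k : Int)).foldl (pvStepA words)
      (PySem.Dict.empty, PySem.Set.empty) with hst
    have hword : (PySem.List.pyGet? words (k : Int)).getD "" = pvW words k := by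
      rw [PySem.List.pyGet?_natCast]; rfl
    have hcont : st.1.contains (pvW words k) = (pvFirst? words k (pvW words k)).isSome := by
      rw [PySem.Dict.contains_eq_isSome_get?, ihA]
    by_cases hmem : pvW words k ∈ words.take k
    · -- the word was seen before: res.add(counter[word])
      obtain ⟨x0, hx0⟩ : ∃ x0, pvFirst? words k (pvW words k) = some x0 := by
        rcases hp : pvFirst? words k (pvW words k) with _ | j
        · exact absurd ((pvFirst?_none_iff words k _ (by omega)).mp hp) (by simpa using hmem)
        · exact ⟨j, rfl⟩
      obtain ⟨jn, rfl, hjnlt, hjnW, hjnnm⟩ := pvFirst?_spec words k _ _ (by omega) hx0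
      have hstep : pvStepA words st (k : Int)
          = (st.1, st.2.add ((jn : Nat) : Int)) := by
        simp only [pvStepA, hword]
        rw [hcont, hx0]
        simp [PySem.Dict.getD_eq_get?_getD, ihA, hx0]
      rw [hstep]
      have hfs := pvFirst?_succ_of_mem words k (by omega) hmem
      have htake := pvTake_succ words k hklt
      refine ⟨fun w => by rw [ihA, hfs], fun x => ?_, PySem.Set.nodup_add _ _ ihC⟩
      rw [PySem.Set.mem_add, ihB]
      constructor
      · rintro (⟨mn, rfl, hf, hc⟩ | rfl)
        · refine ⟨mn, rfl, by rw [hfs]; exact hf, ?_⟩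
          rw [htake, List.count_append]
          omega
        · refine ⟨jn, rfl, by rw [hfs, hjnW]; exact hx0, ?_⟩
          rw [htake, List.count_append, hjnW]
          have h1 : 1 ≤ List.count (pvW words k) (words.take k) := by
            rw [Nat.one_le_iff_ne_zero, Ne, List.count_eq_zero]
            simpa using hmem
          have h2 : List.count (pvW words k) [pvW words k] = 1 := by simp
          omega
      · rintro ⟨mn, rfl, hf, hc⟩
        rw [hfs] at hf
        by_cases hw : pvW words mn = pvW words k
        · right
          rw [hw, hx0] at hf
          have : mn = jn := by simpa using hf.symm
          simp [this]
        · left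
          refine ⟨mn, rfl, hf, ?_⟩
          rw [htake, List.count_append] at hc
          have : List.count (pvW words mn) [pvW words k] = 0 := by
            rw [List.count_eq_zero]
            simpa using hw
          omega
    · -- first sighting: counter[word] = i
      have hstep : pvStepA words st (k : Int)
          = (st.1.insert (pvW words k) (k : Int), st.2) := by
        simp only [pvStepA, hword]
        rw [hcont, (pvFirst?_none_iff words k _ (by omega)).mpr hmem]
        simp
      rw [hstep]
      have hfs := pvFirst?_succ_of_not_mem words k (by omega) hmem
      have htake := pvTake_succ words k hklt
      refine ⟨fun w => ?_, fun x => ?_, ihC⟩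
      · rw [PySem.Dict.get?_insert, hfs, ihA]
      · rw [ihB]
        constructor
        · rintro ⟨mn, rfl, hf, hc⟩
          have hw : pvW words mn ≠ pvW words k := by
            intro hw
            rw [hw, (pvFirst?_none_iff words k _ (by omega)).mpr hmem] at hf
            exact absurd hf (by simp)
          refine ⟨mn, rfl, by rw [hfs, if_neg hw]; exact hf, ?_⟩
          rw [htake, List.count_append]
          omega
        · rintro ⟨mn, rfl, hf, hc⟩
          rw [hfs] at hf
          by_cases hw : pvW words mn = pvW words k
          · rw [if_pos hw] at hf
            have hmk : mn = k := by simpa using hf.symm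
            subst hmk
            rw [htake, List.count_append, hw, List.count_eq_zero.mpr (hw ▸ hmem)] at hc
            simp at hc
          · rw [if_neg hw] at hf
            refine ⟨mn, rfl, hf, ?_⟩
            rw [htake, List.count_append] at hc
            have : List.count (pvW words mn) [pvW words k] = 0 := by
              rw [List.count_eq_zero]
              simpa using hw
            omega

lemma pvC_pairwise (words : List String) : (pvC words).Pairwise (· < ·) := by
  unfold pvC
  exact List.Pairwise.map _ (fun a b h => Int.ofNat_lt.mpr h)
    (List.Pairwise.filter _ List.pairwise_lt_range)

lemma pvC_mem (words : List String) (x : Int) :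
    x ∈ pvC words ↔ ∃ jn : Nat, x = (jn : Int) ∧ jn < words.length ∧ pvP words jn := by
  unfold pvC
  simp only [List.mem_map, List.mem_filter, List.mem_range, decide_eq_true_eq]
  constructor
  · rintro ⟨j, ⟨hj, hp⟩, rfl⟩
    exact ⟨j, rfl, hj, hp⟩
  · rintro ⟨j, rfl, hj, hp⟩
    exact ⟨j, ⟨hj, hp⟩, rfl⟩

lemma pvA_eq (words : List String) : get_duplicate_indices words = pvC words := by
  rw [pvA_unfold]
  obtain ⟨-, hB, hC⟩ := pvA_inv words words.length le_rfl
  refine PySem.List.sorted_eq_of_perm_of_pairwise_lt _ _ _ ?_ (pvC_pairwise words)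
  rw [List.perm_ext_iff_of_nodup
    (List.Pairwise.imp ne_of_lt (pvC_pairwise words) : (pvC words).Nodup) hC]
  intro x
  rw [pvC_mem, hB]
  constructor
  · rintro ⟨jn, rfl, hlt, hnm, hc⟩
    refine ⟨jn, rfl, pvFirst?_of_first words words.length jn le_rfl hlt hnm, ?_⟩
    rw [List.take_length]
    exact hc
  · rintro ⟨jn, rfl, hf, hc⟩
    obtain ⟨mn, hmn, hlt, hWmn, hnm⟩ := pvFirst?_spec words words.length _ _ le_rfl hf
    have hmj : mn = jn := by exact_mod_cast hmn.symm
    subst hmj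
    rw [List.take_length] at hc
    exact ⟨mn, rfl, hlt, hnm, hc⟩

lemma pvB_loop (words : List String) (ys : List String) :
    ∀ (k : Nat) (s : PySem.Set String) (acc : List Int),
      words.drop k = ys →
      (∀ w, s.contains w = true ↔ (w ∈ words.take k ∧ 2 ≤ List.count w words)) →
      ((PySem.List.enumerate ys (k : Int)).foldl (pvStepB words) (s, acc)).2
        = acc ++ ((List.range' k ys.length).filter (fun j => decide (pvP words j))).map
            (fun j => Int.ofNat j) := by
  induction ys with
  | nil => intro k s acc _ _; simp [PySem.List.enumerate_nil]
  | cons y ys' ih =>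
    intro k s acc hd hseen
    have hk1 : k < words.length := by
      by_contra h
      rw [List.drop_eq_nil_of_le (by omega)] at hd
      simp at hd
    have hy : words[k]? = some y := by
      have h0 : (words.drop k)[0]? = words[k + 0]? := List.getElem?_drop
      rw [hd] at h0
      simpa using h0.symm
    have hW : pvW words k = y := by simp [pvW, hy]
    have hd' : words.drop (k + 1) = ys' := by
      rw [← List.drop_drop, hd]
      rfl
    have htake := pvTake_succ words k hk1
    have hseen_mem : ∀ w, w ∈ s ↔ (w ∈ words.take k ∧ 2 ≤ List.count w words) :=
      fun w => (PySem.Set.contains_iff s w).symm.trans (hseen w)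
    have hcast : ((k : Int) + 1) = ((k + 1 : Nat) : Int) := by push_cast; ring
    rw [PySem.List.enumerate_cons, List.foldl_cons]
    simp only [List.length_cons]
    rw [List.range'_succ, List.filter_cons]
    by_cases hp : pvP words k
    · have hc2 : 2 ≤ List.count y words := hW ▸ hp.2
      have hnm : y ∉ words.take k := hW ▸ hp.1
      have hcontains : s.contains y = false := by
        rcases hsc : s.contains y
        · rfl
        · exact absurd ((hseen y).mp hsc).1 hnm
      have hstep : pvStepB words (s, acc) ((k : Int), y) = (s.add y, acc ++ [(k : Int)]) := by
        unfold pvStepB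
        rw [if_pos]
        refine ⟨?_, hcontains⟩
        rw [PySem.Dict.getD_counter]
        exact_mod_cast hc2
      have hseen' : ∀ w, (s.add y).contains w = true ↔
          (w ∈ words.take (k + 1) ∧ 2 ≤ List.count w words) := by
        intro w
        rw [PySem.Set.contains_iff, PySem.Set.mem_add, htake]
        constructor
        · rintro (hw | rfl)
          · obtain ⟨h1, h2⟩ := (hseen_mem w).mp hw
            exact ⟨List.mem_append_left _ h1, h2⟩
          · exact ⟨by rw [hW]; simp, hc2⟩
        · rintro ⟨h1, h2⟩
          rcases List.mem_append.mp h1 with h1 | h1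
          · exact Or.inl ((hseen_mem w).mpr ⟨h1, h2⟩)
          · right
            simpa [hW] using h1
      rw [hstep, hcast, ih (k + 1) (s.add y) (acc ++ [(k : Int)]) hd' hseen']
      rw [if_pos (by simpa using hp), List.map_cons, List.append_assoc]
      rfl
    · have hstep : pvStepB words (s, acc) ((k : Int), y) = (s, acc) := by
        unfold pvStepB
        rw [if_neg]
        rintro ⟨h1, h2⟩
        rw [PySem.Dict.getD_counter] at h1
        have hc2 : 2 ≤ List.count y words := by exact_mod_cast h1
        have hin : y ∈ words.take k := by
          by_contra hin
          exact hp ⟨hW ▸ hin, hW ▸ hc2⟩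
        rw [(hseen y).mpr ⟨hin, hc2⟩] at h2
        simp at h2
      have hseen' : ∀ w, s.contains w = true ↔
          (w ∈ words.take (k + 1) ∧ 2 ≤ List.count w words) := by
        intro w
        rw [hseen w, htake]
        constructor
        · rintro ⟨h1, h2⟩
          exact ⟨List.mem_append_left _ h1, h2⟩
        · rintro ⟨h1, h2⟩
          rcases List.mem_append.mp h1 with h1 | h1
          · exact ⟨h1, h2⟩
          · have hwy : w = pvW words k := by simpa using h1
            subst hwy
            have hmem : pvW words k ∈ List.take k words := by
              by_contra hmem
              exact hp ⟨hmem, h2⟩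
            exact ⟨hmem, h2⟩
      rw [hstep, hcast, ih (k + 1) s acc hd' hseen']
      rw [if_neg (by simpa using hp)]

lemma pvB_eq (words : List String) : get_duplicate_indices_alt words = pvC words := by
  rw [pvB_unfold]
  have h0 : (0 : Int) = ((0 : Nat) : Int) := rfl
  rw [h0, pvB_loop words words 0 PySem.Set.empty [] rfl
    (by intro w; simp [PySem.Set.empty, PySem.Set.contains])]
  rw [← List.range_eq_range']
  rfl

-- ===== VERDICT (by name: the statement is the Claim_ definition above) =====
theorem get_duplicate_indices_spec : Claim_equal_get_duplicate_indices := by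
  intro words _
  unfold Spec_get_duplicate_indices
  rw [pvA_eq, pvB_eq]
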